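-- pv_equiv track=rewrite | github.com/pagefaultgames/pokerogue | src/locales/tools/fusion-affixes-generator.py | find_suffixes
-- ===== SOURCE A (Python) =====
-- def find_suffixes(pokemon_name):
--     result = []
--     processed = {}  # This dictionary will keep track of the names that have been processed
--     for word in pokemon_name:
--         base_word = word  # Treat regional variants as separate entries
--         if base_word not in processed:  # Only process the name if it hasn't been processed before
--             suffix = ""
--             for other_word in pokemon_name:
--                 other_base_word = other_word
--                 if base_word != other_base_word:
--                     temp_suffix = ""
--                     for w, o in zip(base_word[::-1], other_base_word[::-1]):
--                         if w == o:
--                             temp_suffix = w + temp_suffix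
--                         else:
--                             break
--                     if len(temp_suffix) > len(suffix):
--                         suffix = temp_suffix
--             # Check if the longest shared suffix is the entire species name
--             if len(suffix) == len(base_word):
--                 processed[base_word] = suffix
--             else:
--                 # Add the next character in the name to the 'root' of the suffix
--                 root = base_word[len(base_word) - len(suffix) - 1] + suffix
--                 # If the root of the suffix ends in a vowel, that should be the result
--                 if root[0].lower() in "aeiouyáééíóúàèìòùâêîôûäëïöüãẽĩõũæœøýỳÿŷỹ":
--                     processed[base_word] = root
--                 elif len(root) >= 6:  # Check if the 'root' is 6 characters or longer
--                     processed[base_word] = root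
--                 else:  # Try to create an extension to the next vowel
--                     extension = ""
--                     for char in base_word[len(base_word) - len(root) - 1::-1]:
--                         extension = char + extension
--                         if char.lower() in "aeiouyáééíóúàèìòùâêîôûäëïöüãẽĩõũæœøýỳÿŷỹ":
--                             break
--                     # Check if the root+extension will be longer than 6 characters
--                     if len(extension + root) > 6:
--                         processed[base_word] = root
--                     else:
--                         processed[base_word] = extension + root
--         # Ensure the first character of the suffix is a lowercase letter
--         processed[base_word] = processed[base_word][0].lower() + processed[base_word][1:]
--         # Check if the character before the suffix is a hyphen
--         if len(base_word) > len(processed[base_word]) and base_word[len(base_word) - len(processed[base_word]) - 2] == '-':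
--             processed[base_word] = '-' + processed[base_word]
--         result.append(processed[base_word])
--     return result
-- ===== SOURCE B (Python) =====
-- def find_suffixes(pokemon_name):
--     vowels = "aeiouyáééíóúàèìòùâêîôûäëïöüãẽĩõũæœøýỳÿŷỹ"
--     distinct = list(dict.fromkeys(pokemon_name))
--     # Index built once: each nonempty suffix of each distinct name -> how many distinct names carry it.
--     count = {}
--     for name in distinct:
--         for k in range(1, len(name) + 1):
--             tail = name[len(name) - k:]
--             count[tail] = count.get(tail, 0) + 1
--
--     def shared_suffix(word):
--         # longest suffix of `word` that some different name also ends with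
--         for k in range(len(word), 0, -1):
--             tail = word[len(word) - k:]
--             if count.get(tail, 0) >= 2:
--                 return tail
--         return ""
--
--     def affix(word):
--         suffix = shared_suffix(word)
--         if len(suffix) == len(word):
--             return suffix
--         root = word[len(word) - len(suffix) - 1] + suffix
--         if root[0].lower() in vowels or len(root) >= 6:
--             return root
--         extension = ""
--         for char in word[len(word) - len(root) - 1::-1]:
--             extension = char + extension
--             if char.lower() in vowels:
--                 break
--         return root if len(extension + root) > 6 else extension + root
--
--     cache = {}
--     result = []
--     for word in pokemon_name:
--         if word not in cache:
--             cache[word] = affix(word)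
--         entry = cache[word][0].lower() + cache[word][1:]
--         if len(word) > len(entry) and word[len(word) - len(entry) - 2] == '-':
--             entry = '-' + entry
--         cache[word] = entry
--         result.append(entry)
--     return result
-- ===== Notes on version B (the rewrite author's own statement) =====
-- stated objective: faster
-- what changed: Replaces A's per-word scan over all other names with char-by-char suffix comparison (O(n^2*L)) by a suffix-count index built once over the distinct names, so each word's longest shared suffix is found by length-descending index lookups with no inner scan over the other names.
import Mathlib
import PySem

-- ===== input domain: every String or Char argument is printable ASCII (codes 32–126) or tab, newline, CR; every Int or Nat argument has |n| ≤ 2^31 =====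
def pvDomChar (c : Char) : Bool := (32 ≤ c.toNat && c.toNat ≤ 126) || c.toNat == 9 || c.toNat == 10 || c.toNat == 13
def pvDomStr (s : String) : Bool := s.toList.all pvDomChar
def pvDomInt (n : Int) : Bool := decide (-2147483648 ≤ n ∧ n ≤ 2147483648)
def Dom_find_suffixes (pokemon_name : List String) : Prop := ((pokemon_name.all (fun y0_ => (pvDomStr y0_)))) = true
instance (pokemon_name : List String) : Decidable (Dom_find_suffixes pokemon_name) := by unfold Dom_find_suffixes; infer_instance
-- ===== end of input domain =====

-- B replaces A's quadratic pairwise suffix scan by a suffix-count index built once over the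
-- distinct names (objective: faster; the affix post-processing rules are the same in both).

-- shared vowel string literal of both sources
def pvVowels : List Char := "aeiouyáééíóúàèìòùâêîôûäëïöüãẽĩõũæœøýỳÿŷỹ".toList

-- shared inner loop "for char in …: extension = char + extension; if char.lower() in vowels: break"
-- (textually identical in Source A and Source B)
def pvExtLoop : List Char → List Char → List Char
  | [], e => e
  | c :: rest, e =>
    if PySem.Chars.isIn [PySem.Chars.lowerChar c] pvVowels then c :: e
    else pvExtLoop rest (c :: e)

-- shared per-occurrence final two statements (lowercase first char, possible '-' prefix);
-- textually identical in Source A and Source B.  p[0] on p = "" is an IndexError (outside Pre_): default ' '.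
def pvFinalize (word p : List Char) : List Char :=
  let q := PySem.Chars.lowerChar (PySem.List.pyGetD p 0 ' ') :: PySem.List.slice p (some 1) none
  if q.length < word.length ∧ PySem.List.pyGetD word ((word.length : Int) - q.length - 2) ' ' = '-'
  then '-' :: q else q

-- ===== PORT A =====
-- "for w, o in zip(base_word[::-1], other[::-1]): if w == o: temp = w + temp else: break"
def pvTempLoop : List (Char × Char) → List Char → List Char
  | [], t => t
  | (w, o) :: rest, t => if w == o then pvTempLoop rest (w :: t) else t

-- A's middle loop: longest common suffix of `word` with any other entry of the list
def pvSuffixA (ws : List (List Char)) (word : List Char) : List Char :=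
  ws.foldl (fun suffix other =>
    if word ≠ other then
      let temp := pvTempLoop (List.zip ((PySem.List.slice? word none none (-1)).getD [])
                                       ((PySem.List.slice? other none none (-1)).getD [])) []
      if suffix.length < temp.length then temp else suffix
    else suffix) []

-- A's classification of the computed suffix (root / vowel / length-6 / extension rules);
-- root = word[len(word)-len(suffix)-1] + suffix, root[0] read back by index as in the source
def pvClassifyA (word suffix : List Char) : List Char :=
  if suffix.length = word.length then suffix
  else
    let root := PySem.List.pyGetD word ((word.length : Int) - suffix.length - 1) ' ' :: suffix
    if PySem.Chars.isIn [PySem.Chars.lowerChar (PySem.List.pyGetD root 0 ' ')] pvVowels then root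
    else if 6 ≤ root.length then root
    else
      let extension := pvExtLoop
        ((PySem.List.slice? word (some ((word.length : Int) - root.length - 1)) none (-1)).getD []) []
      if 6 < (extension ++ root).length then root else extension ++ root

def pvStepA (ws : List (List Char)) (st : List (List Char) × PySem.Dict (List Char) (List Char))
    (word : List Char) : List (List Char) × PySem.Dict (List Char) (List Char) :=
  let processed := if (st.2).contains word then st.2
                   else (st.2).insert word (pvClassifyA word (pvSuffixA ws word))
  let entry := pvFinalize word (processed.getD word [])
  (st.1 ++ [entry], processed.insert word entry)

def find_suffixes (pokemon_name : List String) : List String :=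
  let ws := pokemon_name.map String.toList
  (ws.foldl (pvStepA ws) ([], PySem.Dict.empty)).1.map String.ofList

-- ===== PORT B =====
-- "for name in distinct: for k in range(1, len(name)+1): count[name[len(name)-k:]] += 1"
def pvCount (distinct : List (List Char)) : PySem.Dict (List Char) Int :=
  distinct.foldl (fun d name =>
    (PySem.List.pyRange 1 ((name.length : Int) + 1) 1).foldl
      (fun d k => d.modify (PySem.List.slice name (some ((name.length : Int) - k)) none) 0 (· + 1)) d)
    PySem.Dict.empty

-- "for k in range(len(word), 0, -1): … return tail" — descending scan with early return
def pvBestLoop (cnt : PySem.Dict (List Char) Int) (word : List Char) : Nat → List Char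
  | 0 => []
  | k + 1 =>
    let tail := PySem.List.slice word (some ((word.length : Int) - ((k : Int) + 1))) none
    if 2 ≤ cnt.getD tail 0 then tail else pvBestLoop cnt word k

def pvSharedSuffix (cnt : PySem.Dict (List Char) Int) (word : List Char) : List Char :=
  pvBestLoop cnt word word.length

def pvAffixB (cnt : PySem.Dict (List Char) Int) (word : List Char) : List Char :=
  let suffix := pvSharedSuffix cnt word
  if suffix.length = word.length then suffix
  else
    let root := PySem.List.pyGetD word ((word.length : Int) - suffix.length - 1) ' ' :: suffix
    if PySem.Chars.isIn [PySem.Chars.lowerChar (PySem.List.pyGetD root 0 ' ')] pvVowels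
       ∨ 6 ≤ root.length then root
    else
      let extension := pvExtLoop
        ((PySem.List.slice? word (some ((word.length : Int) - root.length - 1)) none (-1)).getD []) []
      if 6 < (extension ++ root).length then root else extension ++ root

def pvStepB (cnt : PySem.Dict (List Char) Int) (st : List (List Char) × PySem.Dict (List Char) (List Char))
    (word : List Char) : List (List Char) × PySem.Dict (List Char) (List Char) :=
  let cache := if (st.2).contains word then st.2 else (st.2).insert word (pvAffixB cnt word)
  let entry := pvFinalize word (cache.getD word [])
  (st.1 ++ [entry], cache.insert word entry)

def find_suffixes_alt (pokemon_name : List String) : List String :=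
  let ws := pokemon_name.map String.toList
  let cnt := pvCount (PySem.List.dedup ws)
  (ws.foldl (pvStepB cnt) ([], PySem.Dict.empty)).1.map String.ofList

-- ===== PRECONDITION & SPEC =====
-- A raises IndexError (processed[word][0] on the empty affix) exactly when some name is "";
-- B raises there too, so those inputs are excluded.
def Pre_find_suffixes (pokemon_name : List String) : Prop := "" ∉ pokemon_name
instance (pokemon_name : List String) : Decidable (Pre_find_suffixes pokemon_name) := by
  unfold Pre_find_suffixes; infer_instance
def pvWitness_find_suffixes : List String := ["Bulbasaur", "Ivysaur", "Venusaur"]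

def Spec_find_suffixes (pokemon_name : List String) (out : List String) : Prop := out = find_suffixes_alt pokemon_name
instance (pokemon_name : List String) (out : List String) : Decidable (Spec_find_suffixes pokemon_name out) := by unfold Spec_find_suffixes; infer_instance

-- ===== CLAIM (what is proved, stated in full; the proofs are below) =====
def Claim_equal_find_suffixes : Prop := ∀ (pokemon_name : List String), Dom_find_suffixes pokemon_name → Pre_find_suffixes pokemon_name → Spec_find_suffixes pokemon_name (find_suffixes pokemon_name)

-- ===== LEMMAS AND PROOFS =====

-- proof-only helpers: longest-common-prefix length (used on reversed words), last-k-characters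
def pvLcp : List Char → List Char → Nat
  | x :: xs, y :: ys => if x = y then pvLcp xs ys + 1 else 0
  | _, _ => 0

def pvLastk (w : List Char) (k : Nat) : List Char := w.drop (w.length - k)

-- A's running maximum of common-suffix lengths with entries ≠ word
def pvK (ws : List (List Char)) (word : List Char) : Nat :=
  ws.foldl (fun m o => if word ≠ o then max m (pvLcp word.reverse o.reverse) else m) 0

-- the nonempty suffixes of a name, shortest first (what B's counter indexes)
def pvTails (name : List Char) : List (List Char) :=
  (List.range name.length).map (fun j => name.drop (name.length - 1 - j))

lemma pvLcp_le_left (a b : List Char) : pvLcp a b ≤ a.length := by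
  induction a generalizing b with
  | nil => simp [pvLcp]
  | cons x xs ih =>
    cases b with
    | nil => simp [pvLcp]
    | cons y ys =>
      simp only [pvLcp]
      split_ifs with h
      · simpa using ih ys
      · simp

lemma pvLcp_ge_iff (a b : List Char) (k : Nat) :
    k ≤ pvLcp a b ↔ k ≤ a.length ∧ k ≤ b.length ∧ a.take k = b.take k := by
  induction a generalizing b k with
  | nil => cases k <;> simp [pvLcp]
  | cons x xs ih =>
    cases b with
    | nil => cases k <;> simp [pvLcp]
    | cons y ys =>
      cases k with
      | zero => simp
      | succ k =>
        simp only [pvLcp, List.length_cons, List.take_succ_cons]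
        split_ifs with h
        · subst h
          constructor
          · intro hk
            have hik := (ih ys k).mp (by omega)
            exact ⟨by omega, by omega, by rw [hik.2.2]⟩
          · rintro ⟨h1, h2, h3⟩
            have h3' : xs.take k = ys.take k := by injection h3
            have := (ih ys k).mpr ⟨by omega, by omega, h3'⟩
            omega
        · constructor
          · omega
          · intro ⟨_, _, h3⟩
            exact absurd (by injection h3) h
lemma pvTempLoop_eq (a b : List Char) (t : List Char) :
    pvTempLoop (a.zip b) t = (a.take (pvLcp a b)).reverse ++ t := by
  induction a generalizing b t with
  | nil => simp [pvTempLoop, pvLcp]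
  | cons x xs ih =>
    cases b with
    | nil => simp [pvTempLoop, pvLcp]
    | cons y ys =>
      simp only [List.zip_cons_cons, pvTempLoop, pvLcp]
      split_ifs with h h'
      · simp [ih]
      · simp_all
      · simp_all
      · simp


lemma pvLastk_length (w : List Char) (k : Nat) (h : k ≤ w.length) :
    (pvLastk w k).length = k := by simp [pvLastk]; omega

lemma pvLastk_reverse (w : List Char) (k : Nat) (h : k ≤ w.length) :
    (pvLastk w k).reverse = w.reverse.take k := by
  unfold pvLastk
  rw [List.reverse_drop]
  congr 1
  omega

lemma pvLastk_suffix_iff (word o : List Char) (j : Nat) (hj : j ≤ word.length) :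
    pvLastk word j <:+ o ↔ j ≤ pvLcp word.reverse o.reverse := by
  rw [pvLcp_ge_iff]
  constructor
  · intro hs
    have hlen : j ≤ o.length := by
      have := hs.length_le
      rwa [pvLastk_length word j hj] at this
    refine ⟨by simpa using hj, by simpa using hlen, ?_⟩
    have hp : (pvLastk word j).reverse <+: o.reverse := List.reverse_prefix.mpr hs
    have heq := List.prefix_iff_eq_take.mp hp
    rw [pvLastk_reverse word j hj] at heq
    have hl : (List.take j word.reverse).length = j := by simp; omega
    rw [hl] at heq
    exact heq
  · rintro ⟨h1, h2, h3⟩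
    rw [← List.reverse_prefix, pvLastk_reverse word j hj, h3]
    exact List.take_prefix _ _

lemma pvK_aux_le (ws : List (List Char)) (word : List Char) (m : Nat) (hm : m ≤ word.length) :
    ws.foldl (fun m o => if word ≠ o then max m (pvLcp word.reverse o.reverse) else m) m ≤ word.length := by
  induction ws generalizing m with
  | nil => simpa using hm
  | cons o os ih =>
    simp only [List.foldl_cons]
    split_ifs with h
    · refine ih _ ?_
      have := pvLcp_le_left word.reverse o.reverse
      simp only [List.length_reverse] at this
      omega
    · exact ih _ hm

lemma pvK_le (ws : List (List Char)) (word : List Char) : pvK ws word ≤ word.length :=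
  pvK_aux_le ws word 0 (Nat.zero_le _)

lemma pvK_aux_ge (ws : List (List Char)) (word : List Char) (m j : Nat) :
    j ≤ ws.foldl (fun m o => if word ≠ o then max m (pvLcp word.reverse o.reverse) else m) m
      ↔ j ≤ m ∨ ∃ o ∈ ws, word ≠ o ∧ j ≤ pvLcp word.reverse o.reverse := by
  induction ws generalizing m with
  | nil => simp
  | cons o os ih =>
    simp only [List.foldl_cons, List.mem_cons]
    by_cases h : word ≠ o
    · rw [if_pos h, ih, le_max_iff]
      constructor
      · rintro ((hm | hl) | ⟨o', ho', hne, hle⟩)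
        · exact Or.inl hm
        · exact Or.inr ⟨o, Or.inl rfl, h, hl⟩
        · exact Or.inr ⟨o', Or.inr ho', hne, hle⟩
      · rintro (hm | ⟨o', (rfl | ho'), hne, hle⟩)
        · exact Or.inl (Or.inl hm)
        · exact Or.inl (Or.inr hle)
        · exact Or.inr ⟨o', ho', hne, hle⟩
    · rw [if_neg h, ih]
      have h : word = o := not_not.mp h
      constructor
      · rintro (hm | ⟨o', ho', hne, hle⟩)
        · exact Or.inl hm
        · exact Or.inr ⟨o', Or.inr ho', hne, hle⟩
      · rintro (hm | ⟨o', (rfl | ho'), hne, hle⟩)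
        · exact Or.inl hm
        · exact absurd h hne
        · exact Or.inr ⟨o', ho', hne, hle⟩

lemma pvK_ge_iff (ws : List (List Char)) (word : List Char) (j : Nat) (hj : 1 ≤ j) :
    j ≤ pvK ws word ↔ ∃ o ∈ ws, word ≠ o ∧ j ≤ pvLcp word.reverse o.reverse := by
  unfold pvK
  rw [pvK_aux_ge]
  constructor
  · rintro (h0 | he)
    · omega
    · exact he
  · exact Or.inr

-- ===== counter side =====
lemma pvTails_eq_map (name : List Char) :
    (PySem.List.pyRange 1 ((name.length : Int) + 1) 1).map
      (fun k => PySem.List.slice name (some ((name.length : Int) - k)) none) = pvTails name := by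
  rw [PySem.List.pyRange_one]
  rw [List.map_map]
  have : ((((name.length : Int) + 1) - 1).toNat) = name.length := by omega
  rw [this]
  unfold pvTails
  apply List.map_congr_left
  intro j hj
  rw [List.mem_range] at hj
  simp only [Function.comp]
  rw [PySem.List.slice_from name (show (0:Int) ≤ (name.length : Int) - (1 + (j:Int)) by omega)]
  congr 1
  omega

lemma pvTails_nodup (name : List Char) : (pvTails name).Nodup := by
  unfold pvTails
  refine List.Nodup.map_on ?_ (List.nodup_range)
  intro x hx y hy hxy
  rw [List.mem_range] at hx hy
  have lx : (name.drop (name.length - 1 - x)).length = x + 1 := by simp; omega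
  have ly : (name.drop (name.length - 1 - y)).length = y + 1 := by simp; omega
  have := congrArg List.length hxy
  rw [lx, ly] at this
  omega

lemma pvTails_mem (name s : List Char) : s ∈ pvTails name ↔ s ≠ [] ∧ s <:+ name := by
  unfold pvTails
  simp only [List.mem_map, List.mem_range]
  constructor
  · rintro ⟨j, hj, rfl⟩
    refine ⟨?_, List.drop_suffix _ _⟩
    have : (name.drop (name.length - 1 - j)).length = j + 1 := by simp; omega
    intro hnil
    rw [hnil] at this
    simp at this
  · rintro ⟨hne, ⟨t, rfl⟩⟩
    have hslen : 1 ≤ s.length := by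
      cases s
      · exact absurd rfl hne
      · simp
    refine ⟨s.length - 1, by simp; omega, ?_⟩
    have h2 : (t ++ s).length - 1 - (s.length - 1) = t.length := by simp; omega
    rw [h2, List.drop_left]

lemma pvTails_count (name s : List Char) (hs : s ≠ []) :
    (pvTails name).count s = if s <:+ name then 1 else 0 := by
  by_cases h : s <:+ name
  · rw [if_pos h]
    exact List.count_eq_one_of_mem (pvTails_nodup name) ((pvTails_mem name s).mpr ⟨hs, h⟩)
  · rw [if_neg h, List.count_eq_zero]
    intro hm
    exact h ((pvTails_mem name s).mp hm).2

lemma pvCount_aux (l : List (List Char)) (d : PySem.Dict (List Char) Int) (s : List Char) (hs : s ≠ []) :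
    (l.foldl (fun d name =>
      (PySem.List.pyRange 1 ((name.length : Int) + 1) 1).foldl
        (fun d k => d.modify (PySem.List.slice name (some ((name.length : Int) - k)) none) 0 (· + 1)) d) d).getD s 0
    = d.getD s 0 + (l.countP (fun n => decide (s <:+ n)) : Int) := by
  induction l generalizing d with
  | nil => simp
  | cons name os ih =>
    simp only [List.foldl_cons]
    rw [ih]
    have hinner : (PySem.List.pyRange 1 ((name.length : Int) + 1) 1).foldl
        (fun d k => d.modify (PySem.List.slice name (some ((name.length : Int) - k)) none) 0 (· + 1)) d
        = ((pvTails name).foldl (fun d x => d.modify x 0 (· + 1)) d) := by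
      rw [← pvTails_eq_map, List.foldl_map]
    rw [hinner, PySem.Dict.getD_foldl_modify_add_one, pvTails_count name s hs, List.countP_cons]
    by_cases h : s <:+ name
    · simp only [if_pos h, decide_eq_true_eq]
      push_cast
      ring
    · simp only [if_neg h]
      have hd : decide (s <:+ name) = false := by simp [h]
      simp [hd]

lemma pvCount_getD (distinct : List (List Char)) (s : List Char) (hs : s ≠ []) :
    (pvCount distinct).getD s 0 = ((distinct.countP (fun n => decide (s <:+ n))) : Int) := by
  unfold pvCount
  rw [pvCount_aux _ _ _ hs]
  simp

lemma pvCountP_two_iff (l : List (List Char)) (w : List Char) (p : List Char → Bool)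
    (hnd : l.Nodup) (hw : w ∈ l) (hpw : p w = true) :
    2 ≤ l.countP p ↔ ∃ o ∈ l, o ≠ w ∧ p o = true := by
  have hperm : l.Perm (w :: l.erase w) := List.perm_cons_erase hw
  rw [hperm.countP_eq]
  rw [List.countP_cons, hpw]
  have hone : (if (true:Bool) = true then (1:Nat) else 0) = 1 := rfl
  rw [hone]
  constructor
  · intro h
    have : 0 < (l.erase w).countP p := by omega
    rw [List.countP_pos_iff] at this
    obtain ⟨o, ho, hpo⟩ := this
    have := (hnd.mem_erase_iff).mp ho
    exact ⟨o, this.2, this.1, hpo⟩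
  · rintro ⟨o, ho, hne, hpo⟩
    have : o ∈ l.erase w := (hnd.mem_erase_iff).mpr ⟨hne, ho⟩
    have : 0 < (l.erase w).countP p := List.countP_pos_iff.mpr ⟨o, this, hpo⟩
    omega

-- ===== A's fold and B's loop =====
lemma pvTemp_val (word o : List Char) :
    pvTempLoop (List.zip ((PySem.List.slice? word none none (-1)).getD [])
                         ((PySem.List.slice? o none none (-1)).getD [])) []
      = pvLastk word (pvLcp word.reverse o.reverse) := by
  rw [PySem.List.slice?_none_none_neg_one, PySem.List.slice?_none_none_neg_one]
  simp only [Option.getD_some]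
  rw [pvTempLoop_eq]
  have hle : pvLcp word.reverse o.reverse ≤ word.length := by
    have := pvLcp_le_left word.reverse o.reverse
    simpa using this
  rw [← pvLastk_reverse word _ hle]
  simp

lemma pvSuffixA_aux2 (ws : List (List Char)) (word : List Char) (m : Nat) (hm : m ≤ word.length) :
    ws.foldl (fun suffix other =>
      if word ≠ other then
        if suffix.length < (pvLastk word (pvLcp word.reverse other.reverse)).length
        then pvLastk word (pvLcp word.reverse other.reverse) else suffix
      else suffix) (pvLastk word m)
    = pvLastk word (ws.foldl (fun m o => if word ≠ o then max m (pvLcp word.reverse o.reverse) else m) m) := by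
  induction ws generalizing m with
  | nil => rfl
  | cons o os ih =>
    simp only [List.foldl_cons]
    by_cases h : word ≠ o
    · rw [if_pos h, if_pos h]
      have hK : pvLcp word.reverse o.reverse ≤ word.length := by
        have := pvLcp_le_left word.reverse o.reverse; simpa using this
      rw [pvLastk_length word m hm, pvLastk_length word _ hK]
      by_cases hlt : m < pvLcp word.reverse o.reverse
      · rw [if_pos hlt]
        have hmax : max m (pvLcp word.reverse o.reverse) = pvLcp word.reverse o.reverse := by omega
        rw [hmax]
        exact ih _ hK
      · rw [if_neg hlt]
        have hmax : max m (pvLcp word.reverse o.reverse) = m := by omega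
        rw [hmax]
        exact ih _ hm
    · rw [if_neg h, if_neg h]
      exact ih _ hm

lemma pvSuffixA_eq (ws : List (List Char)) (word : List Char) :
    pvSuffixA ws word = pvLastk word (pvK ws word) := by
  unfold pvSuffixA pvK
  have hcongr := PySem.List.foldl_congr_mem ws
    (fun suffix other =>
      if word ≠ other then
        let temp := pvTempLoop (List.zip ((PySem.List.slice? word none none (-1)).getD [])
                                         ((PySem.List.slice? other none none (-1)).getD [])) []
        if suffix.length < temp.length then temp else suffix
      else suffix)
    (fun suffix other =>
      if word ≠ other then
        if suffix.length < (pvLastk word (pvLcp word.reverse other.reverse)).length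
        then pvLastk word (pvLcp word.reverse other.reverse) else suffix
      else suffix) []
    (by
      intro acc x hx
      by_cases h : word ≠ x
      · simp only [if_pos h, pvTemp_val]
      · simp only [if_neg h])
  rw [hcongr]
  have h0 : ([] : List Char) = pvLastk word 0 := by simp [pvLastk]
  rw [h0, pvSuffixA_aux2 ws word 0 (Nat.zero_le _)]

lemma pvBestLoop_eq (cnt : PySem.Dict (List Char) Int) (word : List Char) (K k : Nat)
    (hK : K ≤ k) (hk : k ≤ word.length)
    (h : ∀ j, 1 ≤ j → j ≤ word.length → (2 ≤ cnt.getD (pvLastk word j) 0 ↔ j ≤ K)) :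
    pvBestLoop cnt word k = pvLastk word K := by
  induction k with
  | zero =>
    have : K = 0 := by omega
    subst this
    simp [pvBestLoop, pvLastk]
  | succ k ih =>
    have htail : PySem.List.slice word (some ((word.length : Int) - ((k : Int) + 1))) none
        = pvLastk word (k + 1) := by
      rw [PySem.List.slice_from word (show (0:Int) ≤ (word.length : Int) - ((k : Int) + 1) by omega)]
      unfold pvLastk
      congr 1
      omega
    simp only [pvBestLoop, htail]
    by_cases hc : 2 ≤ cnt.getD (pvLastk word (k + 1)) 0
    · rw [if_pos hc]
      have h1 := (h (k + 1) (by omega) (by omega)).mp hc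
      have h2 : K = k + 1 := by omega
      rw [h2]
    · rw [if_neg hc]
      have hKk : K ≤ k := by
        by_contra hgt
        have : K = k + 1 := by omega
        exact hc ((h (k + 1) (by omega) (by omega)).mpr (by omega))
      exact ih hKk (by omega)

lemma pvSharedSuffix_eq (ws : List (List Char)) (word : List Char) (hw : word ∈ ws) :
    pvSharedSuffix (pvCount (PySem.List.dedup ws)) word = pvSuffixA ws word := by
  rw [pvSuffixA_eq]
  unfold pvSharedSuffix
  refine pvBestLoop_eq _ word (pvK ws word) word.length (pvK_le ws word) le_rfl ?_
  intro j hj hjlen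
  have hsne : pvLastk word j ≠ [] := by
    intro hnil
    have := pvLastk_length word j hjlen
    rw [hnil] at this
    simp at this
    omega
  rw [pvCount_getD _ _ hsne]
  have hcast : (2:Int) ≤ ((PySem.List.dedup ws).countP (fun n => decide (pvLastk word j <:+ n)) : Int)
      ↔ 2 ≤ (PySem.List.dedup ws).countP (fun n => decide (pvLastk word j <:+ n)) := by
    exact_mod_cast Iff.rfl
  rw [hcast]
  have hwd : word ∈ PySem.List.dedup ws := (PySem.List.mem_dedup ws word).mpr hw
  rw [pvCountP_two_iff _ word _ (PySem.List.nodup_dedup ws) hwd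
        (by unfold pvLastk; exact decide_eq_true (List.drop_suffix _ _))]
  constructor
  · rintro ⟨o, ho, hne, hpo⟩
    rw [decide_eq_true_eq] at hpo
    rw [pvK_ge_iff ws word j hj]
    exact ⟨o, (PySem.List.mem_dedup ws o).mp ho, fun he => hne (he ▸ rfl), (pvLastk_suffix_iff word o j hjlen).mp hpo⟩
  · intro hK
    rw [pvK_ge_iff ws word j hj] at hK
    obtain ⟨o, ho, hne, hle⟩ := hK
    exact ⟨o, (PySem.List.mem_dedup ws o).mpr ho, fun he => hne (he ▸ rfl),
      decide_eq_true ((pvLastk_suffix_iff word o j hjlen).mpr hle)⟩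

lemma pvAffixB_eq (cnt : PySem.Dict (List Char) Int) (word : List Char) :
    pvAffixB cnt word = pvClassifyA word (pvSharedSuffix cnt word) := by
  unfold pvAffixB pvClassifyA
  by_cases h0 : (pvSharedSuffix cnt word).length = word.length
  · rw [if_pos h0, if_pos h0]
  · rw [if_neg h0, if_neg h0]
    dsimp only
    split_ifs <;> first | rfl | tauto

lemma pvStep_eq (ws : List (List Char)) (word : List Char) (hw : word ∈ ws)
    (st : List (List Char) × PySem.Dict (List Char) (List Char)) :
    pvStepA ws st word = pvStepB (pvCount (PySem.List.dedup ws)) st word := by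
  have hk : pvAffixB (pvCount (PySem.List.dedup ws)) word = pvClassifyA word (pvSuffixA ws word) := by
    rw [pvAffixB_eq, pvSharedSuffix_eq ws word hw]
  unfold pvStepA pvStepB
  rw [hk]

-- ===== VERDICT (by name: the statement is the Claim_ definition above) =====
theorem find_suffixes_spec : Claim_equal_find_suffixes := by
  intro pokemon_name _ _
  unfold Spec_find_suffixes find_suffixes find_suffixes_alt
  have h := PySem.List.foldl_congr_mem (pokemon_name.map String.toList)
    (pvStepA (pokemon_name.map String.toList))
    (pvStepB (pvCount (PySem.List.dedup (pokemon_name.map String.toList))))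
    ([], PySem.Dict.empty)
    (fun acc x hx => pvStep_eq _ x hx acc)
  show ((pokemon_name.map String.toList).foldl (pvStepA (pokemon_name.map String.toList))
          ([], PySem.Dict.empty)).1.map String.ofList
      = ((pokemon_name.map String.toList).foldl
          (pvStepB (pvCount (PySem.List.dedup (pokemon_name.map String.toList))))
          ([], PySem.Dict.empty)).1.map String.ofList
  rw [h]
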